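-- pv_equiv track=rewrite | github.com/nathanufpb/Phylogeogra | DnaSP/Script_Python/Estatistica_Sumaria_final.py | calculate_pairwise_differences
-- ===== SOURCE A (Python) =====
-- import itertools  # Garantindo a importação de itertools
--
-- def calculate_pairwise_differences(sequences):
--     """Calcula as diferenças nucleotídicas entre todos os pares de sequências."""
--     total_differences = 0
--     total_pairs = 0
--
--     for seq1, seq2 in itertools.combinations(sequences, 2):
--         differences = sum(nt1 != nt2 for nt1, nt2 in zip(seq1, seq2) if nt1 != '-' and nt2 != '-')
--         total_differences += differences
--         total_pairs += 1
--
--     return total_differences, total_pairs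
-- ===== SOURCE B (Python) =====
-- def calculate_pairwise_differences(sequences):
--     """Column-wise counting: same totals as the all-pairs scan, in O(n*L) instead of O(n^2*L)."""
--     n = len(sequences)
--     total_pairs = n * (n - 1) // 2
--     max_len = 0
--     for s in sequences:
--         if len(s) > max_len:
--             max_len = len(s)
--     total_differences = 0
--     for j in range(max_len):
--         column = [s[j] for s in sequences if j < len(s) and s[j] != '-']
--         counts = {}
--         for c in column:
--             counts[c] = counts.get(c, 0) + 1
--         k = len(column)
--         same = 0
--         for v in counts.values():
--             same += v * (v - 1) // 2
--         total_differences += k * (k - 1) // 2 - same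
--     return total_differences, total_pairs
-- ===== Notes on version B (the rewrite author's own statement) =====
-- stated objective: faster
-- what changed: replaced the all-pairs O(n^2*L) scan (itertools.combinations + per-pair zip) by a single per-column pass that counts non-gap bases and computes differences as C(k,2) minus the sum of C(count,2) per base, with total_pairs computed in closed form as n*(n-1)//2
import Mathlib
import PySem

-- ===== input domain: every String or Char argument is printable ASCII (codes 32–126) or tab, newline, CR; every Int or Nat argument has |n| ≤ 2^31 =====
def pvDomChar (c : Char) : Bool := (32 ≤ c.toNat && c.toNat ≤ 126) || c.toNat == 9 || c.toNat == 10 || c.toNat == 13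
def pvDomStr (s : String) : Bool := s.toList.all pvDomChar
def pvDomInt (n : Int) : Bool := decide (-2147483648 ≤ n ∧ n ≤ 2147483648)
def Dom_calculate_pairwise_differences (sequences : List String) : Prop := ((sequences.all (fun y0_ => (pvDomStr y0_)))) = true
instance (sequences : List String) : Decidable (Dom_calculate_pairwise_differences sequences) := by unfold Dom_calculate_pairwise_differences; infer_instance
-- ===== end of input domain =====

-- B replaces A's all-pairs scan by per-column base counting (C(k,2) - Σ C(count,2)); equal results, asymptotically faster.

-- ===== PORT A =====
-- sum(nt1 != nt2 for nt1, nt2 in zip(seq1, seq2) if nt1 != '-' and nt2 != '-')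
def pvDiffA (seq1 seq2 : String) : Int :=
  (seq1.toList.zip seq2.toList).foldl
    (fun acc nt => if nt.1 ≠ '-' ∧ nt.2 ≠ '-' then acc + (if nt.1 ≠ nt.2 then 1 else 0) else acc) 0

def calculate_pairwise_differences (sequences : List String) : Int × Int :=
  (PySem.List.combinations sequences 2).foldl
    (fun acc pair =>
      match pair with
      | [seq1, seq2] => (acc.1 + pvDiffA seq1 seq2, acc.2 + 1)
      | _ => acc)   -- unreachable: every member of combinations _ 2 has length 2
    (0, 0)

-- ===== PORT B =====
-- [s[j] for s in sequences if j < len(s) and s[j] != '-']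
def pvColumn (sequences : List String) (j : Nat) : List Char :=
  sequences.filterMap (fun s =>
    match s.toList[j]? with
    | some c => if c = '-' then none else some c
    | none => none)

def calculate_pairwise_differences_alt (sequences : List String) : Int × Int :=
  let n : Int := sequences.length
  let total_pairs := PySem.Int.floordiv (n * (n - 1)) 2
  let max_len := sequences.foldl (fun m s => if s.toList.length > m then s.toList.length else m) 0
  let total_differences := (List.range max_len).foldl (fun acc j =>
    let column := pvColumn sequences j
    let counts := column.foldl (fun d c => d.insert c (d.getD c 0 + 1)) (PySem.Dict.empty : PySem.Dict Char Int)
    let k : Int := column.length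
    let same := counts.values.foldl (fun a v => a + PySem.Int.floordiv (v * (v - 1)) 2) 0
    acc + (PySem.Int.floordiv (k * (k - 1)) 2 - same)) 0
  (total_differences, total_pairs)

-- ===== PRECONDITION & SPEC =====
def Spec_calculate_pairwise_differences (sequences : List String) (out : Int × Int) : Prop := out = calculate_pairwise_differences_alt sequences
instance (sequences : List String) (out : Int × Int) : Decidable (Spec_calculate_pairwise_differences sequences out) := by unfold Spec_calculate_pairwise_differences; infer_instance

-- ===== CLAIM (what is proved, stated in full; the proofs are below) =====
def Claim_equal_calculate_pairwise_differences : Prop := ∀ (sequences : List String), Dom_calculate_pairwise_differences sequences → Spec_calculate_pairwise_differences sequences (calculate_pairwise_differences sequences)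

-- ===== LEMMAS AND PROOFS =====

-- all unordered pairs (i < j), as A's combinations produce them
def pvComb2 {α : Type} : List α → List (α × α)
  | [] => []
  | x :: xs => (xs.map (fun y => (x, y))) ++ pvComb2 xs

def pvC2 (n : Nat) : Int := (n.choose 2 : Int)

def pvChr (j : Nat) (l : List Char) : Option Char :=
  match l[j]? with
  | some c => if c = '-' then none else some c
  | none => none

def pvG (o1 o2 : Option Char) : Int :=
  match o1, o2 with
  | some a, some b => if a ≠ b then 1 else 0
  | _, _ => 0

def pvSumDiff (cs : List Char) : Int :=
  match cs with
  | [] => 0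
  | x :: t => (t.map (fun y => if x ≠ y then (1:Int) else 0)).sum + pvSumDiff t

lemma pvG_none_left (o : Option Char) : pvG none o = 0 := by cases o <;> rfl
lemma pvG_none_right (o : Option Char) : pvG o none = 0 := by cases o <;> rfl

lemma pvC2_succ (n : Nat) : pvC2 (n + 1) = pvC2 n + n := by
  simp [pvC2, Nat.choose_succ_succ, Nat.choose_one_right]
  omega

lemma pvA_fold1 (x : String) (xs : List String) (a b : Int) :
    (xs.map (fun y => [x, y])).foldl
      (fun acc pair =>
        match pair with
        | [seq1, seq2] => (acc.1 + pvDiffA seq1 seq2, acc.2 + 1)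
        | _ => acc) (a, b)
    = (a + (xs.map (fun y => pvDiffA x y)).sum, b + xs.length) := by
  induction xs generalizing a b with
  | nil => simp
  | cons y t ih => simp [ih]; constructor <;> ring

lemma pvA_fold (l : List String) (a b : Int) :
    (PySem.List.combinations l 2).foldl
      (fun acc pair =>
        match pair with
        | [seq1, seq2] => (acc.1 + pvDiffA seq1 seq2, acc.2 + 1)
        | _ => acc) (a, b)
    = (a + ((pvComb2 l).map (fun p => pvDiffA p.1 p.2)).sum, b + (pvComb2 l).length) := by
  induction l generalizing a b with
  | nil => simp [PySem.List.combinations_nil_succ, pvComb2]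
  | cons x t ih =>
      rw [PySem.List.combinations_cons_succ, PySem.List.combinations_one]
      rw [List.foldl_append]
      simp only [List.map_map]
      have : ((fun y => [x, y]) : String → List String) = (List.cons x ∘ fun x => [x]) := by
        funext y; rfl
      rw [← this, pvA_fold1, ih]
      simp [pvComb2, Function.comp_def]
      constructor
      · ring
      · ring

lemma pvA_eq (l : List String) :
    calculate_pairwise_differences l
    = (((pvComb2 l).map (fun p => pvDiffA p.1 p.2)).sum, ((pvComb2 l).length : Int)) := by
  unfold calculate_pairwise_differences
  rw [pvA_fold]
  simp

lemma pvComb2_len (l : List α) :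
    2 * ((pvComb2 l).length : Int) = (l.length : Int) * ((l.length : Int) - 1) := by
  induction l with
  | nil => simp [pvComb2]
  | cons x t ih =>
      simp [pvComb2] at *
      nlinarith [ih]

lemma pvComb2_mem {α : Type} (l : List α) (p : α × α) (h : p ∈ pvComb2 l) :
    p.1 ∈ l ∧ p.2 ∈ l := by
  induction l with
  | nil => simp [pvComb2] at h
  | cons x t ih =>
      simp [pvComb2] at h
      rcases h with ⟨y, hy, rfl⟩ | h
      · simp [hy]
      · rcases ih h with ⟨h1, h2⟩
        exact ⟨List.mem_cons_of_mem _ h1, List.mem_cons_of_mem _ h2⟩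

lemma pvStep_eq :
    (fun (acc : Int) (nt : Char × Char) => if nt.1 ≠ '-' ∧ nt.2 ≠ '-' then acc + (if nt.1 ≠ nt.2 then 1 else 0) else acc)
    = fun (acc : Int) nt => acc + (if nt.1 ≠ '-' ∧ nt.2 ≠ '-' then (if nt.1 ≠ nt.2 then (1:Int) else 0) else 0) := by
  funext acc nt; split_ifs <;> simp

lemma pvZipSum (l1 l2 : List Char) (M : Nat) (h : min l1.length l2.length ≤ M) :
    ((l1.zip l2).map (fun nt => if nt.1 ≠ '-' ∧ nt.2 ≠ '-' then (if nt.1 ≠ nt.2 then (1:Int) else 0) else 0)).sum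
    = ∑ j ∈ Finset.range M, pvG (pvChr j l1) (pvChr j l2) := by
  induction l1 generalizing l2 M with
  | nil =>
      rw [eq_comm]
      simp only [List.zip_nil_left, List.map_nil, List.sum_nil]
      apply Finset.sum_eq_zero
      intro j _; simp [pvChr, pvG_none_left]
  | cons x t1 ih =>
      cases l2 with
      | nil =>
          rw [eq_comm]
          simp only [List.zip_nil_right, List.map_nil, List.sum_nil]
          apply Finset.sum_eq_zero
          intro j _; simp [pvChr, pvG_none_right]
      | cons y t2 =>
          cases M with
          | zero => simp at h
          | succ M' =>
              rw [Finset.sum_range_succ']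
              have hrec : ∀ j, pvG (pvChr (j+1) (x :: t1)) (pvChr (j+1) (y :: t2)) = pvG (pvChr j t1) (pvChr j t2) := by
                intro j; simp [pvChr]
              simp only [hrec]
              rw [← ih t2 M' (by simp at h ⊢; omega)]
              have hhd : (if x ≠ '-' ∧ y ≠ '-' then (if x ≠ y then (1:Int) else 0) else 0)
                  = pvG (pvChr 0 (x :: t1)) (pvChr 0 (y :: t2)) := by
                by_cases hx : x = '-' <;> by_cases hy : y = '-' <;> simp [pvChr, pvG, hx, hy]
              simp only [List.zip_cons_cons, List.map_cons, List.sum_cons, hhd]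
              ring

-- pvDiffA as a column sum
lemma pvDiffA_cols (s1 s2 : String) (M : Nat) (h : min s1.toList.length s2.toList.length ≤ M) :
    pvDiffA s1 s2 = ∑ j ∈ Finset.range M, pvG (pvChr j s1.toList) (pvChr j s2.toList) := by
  unfold pvDiffA
  rw [pvStep_eq, PySem.List.foldl_add, pvZipSum _ _ _ h, zero_add]

lemma pvSwap {α : Type} (L : List α) (F : α → Nat → Int) (s : Finset Nat) :
    (L.map (fun p => ∑ j ∈ s, F p j)).sum = ∑ j ∈ s, (L.map (fun p => F p j)).sum := by
  induction L with
  | nil => simp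
  | cons x t ih => simp [ih, Finset.sum_add_distrib]

lemma pvRow {α : Type} (a : Char) (L : List α) (f : α → Option Char) :
    (L.map (fun y => pvG (some a) (f y))).sum
    = ((L.filterMap f).map (fun b => if a ≠ b then (1:Int) else 0)).sum := by
  induction L with
  | nil => simp
  | cons y t ih =>
      cases hfy : f y with
      | none =>
          rw [List.map_cons, List.sum_cons, List.filterMap_cons_none hfy, hfy, pvG_none_right, zero_add, ih]
      | some b =>
          rw [List.map_cons, List.sum_cons, List.filterMap_cons_some hfy, List.map_cons, List.sum_cons, ih, hfy]
          rfl

lemma pvPairSum_filterMap {α : Type} (L : List α) (f : α → Option Char) :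
    ((pvComb2 L).map (fun p => pvG (f p.1) (f p.2))).sum
    = pvSumDiff (L.filterMap f) := by
  induction L with
  | nil => simp [pvComb2, pvSumDiff]
  | cons x t ih =>
      simp only [pvComb2, List.map_append, List.sum_append, List.map_map, Function.comp_def]
      cases hfx : f x with
      | none =>
          have hz : (t.map (fun y => pvG none (f y))).sum = 0 := by
            apply List.sum_eq_zero
            intro v hv
            rcases List.mem_map.mp hv with ⟨y, _, rfl⟩
            exact pvG_none_left _
          rw [hz, zero_add, List.filterMap_cons_none hfx]
          exact ih
      | some a =>
          rw [List.filterMap_cons_some hfx]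
          simp only [pvSumDiff]
          rw [pvRow a t f, ih]

lemma pvRowCount (x : Char) (t : List Char) :
    (t.map (fun y => if x ≠ y then (1:Int) else 0)).sum = (t.length : Int) - t.count x := by
  induction t with
  | nil => simp
  | cons y s ih =>
      rw [List.map_cons, List.sum_cons, ih]
      by_cases h : x = y
      · subst h; simp
      · simp [h, Ne.symm h]; ring

lemma pvS_cons (x : Char) (t : List Char) :
    ∑ c ∈ (x :: t).toFinset, pvC2 ((x :: t).count c)
    = (∑ c ∈ t.toFinset, pvC2 (t.count c)) + t.count x := by
  rw [List.toFinset_cons]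
  by_cases hx : x ∈ t
  · have hxf : x ∈ t.toFinset := List.mem_toFinset.mpr hx
    rw [Finset.insert_eq_self.mpr hxf]
    have hcong : ∀ c ∈ t.toFinset,
        pvC2 ((x :: t).count c) = pvC2 (t.count c) + (if c = x then (t.count x : Int) else 0) := by
      intro c _
      by_cases h : c = x
      · subst h; simp [pvC2_succ]
      · simp [h, Ne.symm h]
    rw [Finset.sum_congr rfl hcong, Finset.sum_add_distrib]
    rw [Finset.sum_ite_eq' t.toFinset x (fun _ => (t.count x : Int))]
    simp [hxf]
  · have hxf : x ∉ t.toFinset := fun hc => hx (List.mem_toFinset.mp hc)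
    rw [Finset.sum_insert hxf]
    have h0 : t.count x = 0 := List.count_eq_zero.mpr hx
    have hcong : ∀ c ∈ t.toFinset, pvC2 ((x :: t).count c) = pvC2 (t.count c) := by
      intro c hc
      have hne : c ≠ x := fun h => hxf (h ▸ hc)
      simp [Ne.symm hne]
    rw [Finset.sum_congr rfl hcong]
    simp [h0, pvC2]

lemma pvCount_ident (cs : List Char) :
    pvSumDiff cs = pvC2 cs.length - ∑ c ∈ cs.toFinset, pvC2 (cs.count c) := by
  induction cs with
  | nil => simp [pvSumDiff, pvC2]
  | cons x t ih =>
      have hrow := pvRowCount x t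
      have hS := pvS_cons x t
      simp only [pvSumDiff, List.length_cons]
      rw [hrow, ih, hS, pvC2_succ]
      ring

lemma pvFdiv_c2 (n : Nat) :
    PySem.Int.floordiv ((n : Int) * ((n : Int) - 1)) 2 = pvC2 n := by
  rw [PySem.Int.floordiv_eq_ediv_of_pos (by norm_num)]
  cases n with
  | zero => simp [pvC2]
  | succ m =>
      have : ((m + 1 : Nat) : Int) * (((m + 1 : Nat) : Int) - 1) = (((m + 1) * m : Nat) : Int) := by
        push_cast; ring
      rw [this, show (2:Int) = ((2:Nat):Int) from rfl, ← Int.natCast_div]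
      simp [pvC2, Nat.choose_two_right]

lemma pvColSame (cs : List Char) :
    ((cs.foldl (fun d c => d.insert c (d.getD c 0 + 1)) (PySem.Dict.empty : PySem.Dict Char Int)).values.foldl
      (fun a v => a + PySem.Int.floordiv (v * (v - 1)) 2) 0)
    = ∑ c ∈ cs.toFinset, pvC2 (cs.count c) := by
  rw [PySem.Dict.foldl_insert_getD_add_one_eq_counter, PySem.List.foldl_add, zero_add]
  have hv : (PySem.Dict.counter cs).values = (PySem.Set.ofList cs).map (fun k => ((cs.count k : Int))) := by
    show (PySem.Dict.counter cs).items.map Prod.snd = _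
    rw [PySem.Dict.items_counter]
    simp [List.map_map, Function.comp_def]
  rw [hv, List.map_map]
  have hfun : ((fun v : Int => PySem.Int.floordiv (v * (v - 1)) 2) ∘ fun k => ((cs.count k : Int)))
      = fun k => pvC2 (cs.count k) := by
    funext k; exact pvFdiv_c2 _
  rw [hfun, ← PySem.List.dedup_eq_ofList, ← List.sum_toFinset _ (PySem.List.nodup_dedup cs)]
  have hfe : (PySem.List.dedup cs).toFinset = cs.toFinset := by
    ext c; simp [List.mem_toFinset]
  rw [hfe]

lemma pvRangeSum (M : Nat) (g : Nat → Int) :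
    ((List.range M).map g).sum = ∑ j ∈ Finset.range M, g j := by
  induction M with
  | zero => simp
  | succ m ih => rw [List.range_succ, List.map_append, List.sum_append, Finset.sum_range_succ, ih]; simp

lemma pvColumn_eq (l : List String) (j : Nat) :
    pvColumn l j = l.filterMap (fun s => pvChr j s.toList) := rfl

lemma pvB_eq (l : List String) (M : Nat) :
    ((List.range M).foldl (fun acc j =>
      let column := pvColumn l j
      let counts := column.foldl (fun d c => d.insert c (d.getD c 0 + 1)) (PySem.Dict.empty : PySem.Dict Char Int)
      let k : Int := column.length
      let same := counts.values.foldl (fun a v => a + PySem.Int.floordiv (v * (v - 1)) 2) 0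
      acc + (PySem.Int.floordiv (k * (k - 1)) 2 - same)) 0)
    = ∑ j ∈ Finset.range M, (pvC2 (pvColumn l j).length - ∑ c ∈ (pvColumn l j).toFinset, pvC2 ((pvColumn l j).count c)) := by
  have hstep : (fun (acc : Int) (j : Nat) =>
      let column := pvColumn l j
      let counts := column.foldl (fun d c => d.insert c (d.getD c 0 + 1)) (PySem.Dict.empty : PySem.Dict Char Int)
      let k : Int := column.length
      let same := counts.values.foldl (fun a v => a + PySem.Int.floordiv (v * (v - 1)) 2) 0
      acc + (PySem.Int.floordiv (k * (k - 1)) 2 - same))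
      = fun acc j => acc + (pvC2 (pvColumn l j).length - ∑ c ∈ (pvColumn l j).toFinset, pvC2 ((pvColumn l j).count c)) := by
    funext acc j
    simp only [pvColSame, pvFdiv_c2]
  rw [hstep, PySem.List.foldl_add, zero_add, pvRangeSum]

lemma pvMaxLen (l : List String) :
    ∀ s ∈ l, s.toList.length ≤ l.foldl (fun m s => if s.toList.length > m then s.toList.length else m) 0 := by
  have hc : l.foldl (fun m s => if s.toList.length > m then s.toList.length else m) 0
      = l.foldl (fun m s => max m s.toList.length) 0 := by
    apply PySem.List.foldl_congr_mem
    intro acc x _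
    by_cases h : x.toList.length > acc
    · rw [if_pos h, Nat.max_eq_right (Nat.le_of_lt h)]
    · rw [if_neg h, Nat.max_eq_left (Nat.not_lt.mp h)]
  rw [hc]
  exact (PySem.List.le_foldl_max_nat l (fun s => s.toList.length) 0).2

-- ===== VERDICT (by name: the statement is the Claim_ definition above) =====
theorem calculate_pairwise_differences_spec : Claim_equal_calculate_pairwise_differences := by
  intro l _
  show calculate_pairwise_differences l
      = ((List.range (l.foldl (fun m s => if s.toList.length > m then s.toList.length else m) 0)).foldl (fun acc j =>
          let column := pvColumn l j
          let counts := column.foldl (fun d c => d.insert c (d.getD c 0 + 1)) (PySem.Dict.empty : PySem.Dict Char Int)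
          let k : Int := column.length
          let same := counts.values.foldl (fun a v => a + PySem.Int.floordiv (v * (v - 1)) 2) 0
          acc + (PySem.Int.floordiv (k * (k - 1)) 2 - same)) 0,
        PySem.Int.floordiv ((l.length : Int) * ((l.length : Int) - 1)) 2)
  set M := l.foldl (fun m s => if s.toList.length > m then s.toList.length else m) 0 with hMdef
  rw [pvA_eq, pvB_eq, Prod.mk.injEq]
  constructor
  · -- total differences
    have hcols : ∀ p ∈ pvComb2 l,
        pvDiffA p.1 p.2 = ∑ j ∈ Finset.range M, pvG (pvChr j p.1.toList) (pvChr j p.2.toList) := by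
      intro p hp
      rcases pvComb2_mem l p hp with ⟨h1, h2⟩
      exact pvDiffA_cols p.1 p.2 M (le_trans (Nat.min_le_left _ _) (pvMaxLen l p.1 h1))
    rw [List.map_congr_left hcols, pvSwap]
    apply Finset.sum_congr rfl
    intro j _
    rw [pvPairSum_filterMap l (fun s => pvChr j s.toList), ← pvColumn_eq, pvCount_ident]
  · -- total pairs
    have h2 := pvComb2_len l
    rw [PySem.Int.floordiv_eq_ediv_of_pos (by norm_num), ← h2]
    omega
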